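-- pv_equiv track=rewrite | github.com/cybervaldez/promptyui | mods/prompt_translator.py | simple_translate
-- ===== SOURCE A (Python) =====
-- MOCK_TRANSLATIONS = {
--     'ja': {
--         'beautiful': '美しい',
--         'woman': '女性',
--         'fashion': 'ファッション',
--         'portrait': 'ポートレート',
--         'elegant': 'エレガント'
--     },
--     'es': {
--         'beautiful': 'hermosa',
--         'woman': 'mujer',
--         'fashion': 'moda',
--         'portrait': 'retrato',
--         'elegant': 'elegante'
--     }
-- }
--
-- def simple_translate(text: str, target_lang: str) -> str:
--     """Simple word-by-word translation for demo purposes."""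
--     if target_lang not in MOCK_TRANSLATIONS:
--         return text
--
--     translations = MOCK_TRANSLATIONS[target_lang]
--     result = text.lower()
--     for en_word, translated in translations.items():
--         result = result.replace(en_word, translated)
--     return result
-- ===== SOURCE B (Python) =====
-- # First-letter index: the five keys start with distinct letters, so one dict
-- # lookup on the current character decides which (single) key can match here.
-- _TRANSLATION_INDEX = {
--     'ja': {
--         'b': ('beautiful', '\u7f8e\u3057\u3044'),
--         'w': ('woman', '\u5973\u6027'),
--         'f': ('fashion', '\u30d5\u30a1\u30c3\u30b7\u30e7\u30f3'),
--         'p': ('portrait', '\u30dd\u30fc\u30c8\u30ec\u30fc\u30c8'),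
--         'e': ('elegant', '\u30a8\u30ec\u30ac\u30f3\u30c8'),
--     },
--     'es': {
--         'b': ('beautiful', 'hermosa'),
--         'w': ('woman', 'mujer'),
--         'f': ('fashion', 'moda'),
--         'p': ('portrait', 'retrato'),
--         'e': ('elegant', 'elegante'),
--     },
-- }
--
--
-- def simple_translate(text: str, target_lang: str) -> str:
--     """Single left-to-right scan driven by a first-letter index: at each
--     position look up the current character; if it selects a key that matches
--     here, emit its translation, else copy the character."""
--     index = _TRANSLATION_INDEX.get(target_lang)
--     if index is None:
--         return text
--     s = text.lower()
--     n = len(s)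
--     out = []
--     i = 0
--     while i < n:
--         hit = index.get(s[i])
--         if hit is not None and s.startswith(hit[0], i):
--             out.append(hit[1])
--             i += len(hit[0])
--         else:
--             out.append(s[i])
--             i += 1
--     return ''.join(out)
-- ===== Notes on version B (the rewrite author's own statement) =====
-- stated objective: alternative
-- what changed: A lowercases and then runs five sequential whole-string str.replace passes, one per dictionary entry; B lowercases once and makes a single left-to-right scan driven by a precomputed first-letter index (the five keys start with distinct letters), emitting the translation of the unique key that can match at each position and copying the character otherwise; the results agree because no key overlaps another key or a translated value.
import Mathlib
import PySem

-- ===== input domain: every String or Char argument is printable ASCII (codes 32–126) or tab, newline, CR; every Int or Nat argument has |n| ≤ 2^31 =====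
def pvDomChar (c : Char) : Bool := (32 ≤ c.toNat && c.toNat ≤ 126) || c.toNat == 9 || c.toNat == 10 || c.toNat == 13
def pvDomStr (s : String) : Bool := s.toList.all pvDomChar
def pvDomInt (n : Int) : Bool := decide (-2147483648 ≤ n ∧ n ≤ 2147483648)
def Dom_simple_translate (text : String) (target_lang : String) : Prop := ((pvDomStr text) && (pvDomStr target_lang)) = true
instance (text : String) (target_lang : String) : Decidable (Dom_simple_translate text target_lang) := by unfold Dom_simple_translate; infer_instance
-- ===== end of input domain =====

-- B replaces A's five sequential whole-string str.replace passes by ONE scan driven by a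
-- first-letter index (the keys start with distinct letters), emitting the translation of the
-- unique key that can match at each position (objective: alternative, same result because the
-- keys never overlap one another or the translated values).

-- ===== PORT A =====
-- A's module-level dict of dicts
def pvMOCK : PySem.Dict String (PySem.Dict String String) :=
  PySem.Dict.mk [("ja", PySem.Dict.mk
      [("beautiful", "美しい"), ("woman", "女性"), ("fashion", "ファッション"),
       ("portrait", "ポートレート"), ("elegant", "エレガント")]),
    ("es", PySem.Dict.mk
      [("beautiful", "hermosa"), ("woman", "mujer"), ("fashion", "moda"),
       ("portrait", "retrato"), ("elegant", "elegante")])]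

def simple_translate (text : String) (target_lang : String) : String :=
  match pvMOCK.get? target_lang with
  | none => text                      -- `if target_lang not in MOCK_TRANSLATIONS: return text`
  | some translations =>
      -- `result = text.lower()` then one `result = result.replace(en_word, translated)` per item
      translations.items.foldl
        (fun result kv => PySem.Str.replace result kv.1 kv.2)
        (PySem.Str.lower text)

-- ===== PORT B =====
-- Source B's module-level first-letter index `_TRANSLATION_INDEX`
def pvAltIndex : PySem.Dict String (PySem.Dict Char (String × String)) :=
  PySem.Dict.mk
    [("ja", PySem.Dict.mk
        [('b', ("beautiful", "美しい")), ('w', ("woman", "女性")),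
         ('f', ("fashion", "ファッション")), ('p', ("portrait", "ポートレート")),
         ('e', ("elegant", "エレガント"))]),
     ("es", PySem.Dict.mk
        [('b', ("beautiful", "hermosa")), ('w', ("woman", "mujer")),
         ('f', ("fashion", "moda")), ('p', ("portrait", "retrato")),
         ('e', ("elegant", "elegante"))])]

-- Source B's while-loop over positions: `hit = index.get(s[i])`, then either emit the
-- translation and jump, or copy the character (fuel = remaining length is only a
-- totality guard — the loop always advances by at least one character)
def pvIndexScan (index : PySem.Dict Char (String × String)) : Nat → List Char → List Char
  | 0, _ => []
  | _+1, [] => []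
  | fuel+1, c :: rest =>
    match index.get? c with
    | some hit =>
        if hit.1.toList.isPrefixOf (c :: rest) then
          hit.2.toList ++ pvIndexScan index fuel ((c :: rest).drop hit.1.toList.length)
        else
          c :: pvIndexScan index fuel rest
    | none => c :: pvIndexScan index fuel rest

def simple_translate_alt (text : String) (target_lang : String) : String :=
  match pvAltIndex.get? target_lang with
  | none => text                      -- `index is None`
  | some index =>
      let s := (PySem.Str.lower text).toList
      String.ofList (pvIndexScan index s.length s)

-- ===== PRECONDITION & SPEC =====
def Spec_simple_translate (text : String) (target_lang : String) (out : String) : Prop := out = simple_translate_alt text target_lang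
instance (text : String) (target_lang : String) (out : String) : Decidable (Spec_simple_translate text target_lang out) := by unfold Spec_simple_translate; infer_instance

-- ===== CLAIM (what is proved, stated in full; the proofs are below) =====
def Claim_equal_simple_translate : Prop := ∀ (text : String) (target_lang : String), Dom_simple_translate text target_lang → Spec_simple_translate text target_lang (simple_translate text target_lang)

-- ===== LEMMAS AND PROOFS =====

-- clean fuelled recursion equal to PySem.Chars.replace's accumulator loop
def repF (old new : List Char) : Nat → List Char → List Char
  | 0, l => l
  | _+1, [] => []
  | fuel+1, c :: t =>
    if old.isPrefixOf (c :: t) then new ++ repF old new fuel ((c :: t).drop old.length)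
    else c :: repF old new fuel t

theorem go_eq (old new : List Char) : ∀ (fuel : Nat) (l acc : List Char),
    PySem.Chars.replace.go old new fuel l acc = acc.reverse ++ repF old new fuel l := by
  intro fuel
  induction fuel with
  | zero => intro l acc; simp [PySem.Chars.replace.go, repF]
  | succ n ih =>
    intro l acc
    cases l with
    | nil => simp [PySem.Chars.replace.go, repF]
    | cons c t =>
      rw [PySem.Chars.replace.go]
      by_cases h : old.isPrefixOf (c :: t)
      · simp [h, ih, repF]
      · simp [h, ih, repF]

theorem replace_eq_repF (s old new : List Char) (h : old ≠ []) :
    PySem.Chars.replace s old new = repF old new s.length s := by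
  rw [PySem.Chars.replace]
  simp [List.isEmpty_iff, h, go_eq]

theorem repF_nil (old new : List Char) (n : Nat) : repF old new n [] = [] := by
  cases n <;> rfl

theorem repF_fuel (old new : List Char) (h : old ≠ []) :
    ∀ (n m : Nat) (l : List Char), l.length ≤ n → l.length ≤ m →
      repF old new n l = repF old new m l := by
  intro n
  induction n with
  | zero =>
    intro m l hn _
    have : l = [] := List.eq_nil_of_length_eq_zero (Nat.le_zero.mp hn)
    subst this; simp [repF_nil]
  | succ n ih =>
    intro m l hn hm
    cases l with
    | nil => simp [repF_nil]
    | cons c t =>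
      cases m with
      | zero => simp at hm
      | succ m =>
        show repF old new (n+1) (c::t) = repF old new (m+1) (c::t)
        by_cases hp : old.isPrefixOf (c :: t)
        · rw [repF, repF, if_pos hp, if_pos hp]
          have h1 : 1 ≤ old.length := by
            cases old with | nil => exact absurd rfl h | cons _ _ => simp
          simp only [List.length_cons] at hn hm
          have hlen : ((c :: t).drop old.length).length ≤ n := by
            simp only [List.length_drop, List.length_cons]; omega
          have hlen' : ((c :: t).drop old.length).length ≤ m := by
            simp only [List.length_drop, List.length_cons]; omega
          rw [ih _ _ hlen hlen']
        · rw [repF, repF, if_neg hp, if_neg hp]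
          simp only [List.length_cons] at hn hm
          rw [ih m t (by omega) (by omega)]

-- the three laws of replace (nonempty pattern)
theorem replace_nil (old new : List Char) (h : old ≠ []) :
    PySem.Chars.replace [] old new = [] := by
  rw [replace_eq_repF _ _ _ h]; rfl

theorem replace_cons (old new : List Char) (h : old ≠ []) (c : Char) (t : List Char)
    (hp : ¬ old <+: (c :: t)) :
    PySem.Chars.replace (c :: t) old new = c :: PySem.Chars.replace t old new := by
  rw [replace_eq_repF _ _ _ h, replace_eq_repF _ _ _ h]
  show repF old new (t.length + 1) (c :: t) = _
  rw [repF, if_neg (by simpa [List.isPrefixOf_iff_prefix] using hp)]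

theorem replace_pref (old new : List Char) (h : old ≠ []) (u : List Char) :
    PySem.Chars.replace (old ++ u) old new = new ++ PySem.Chars.replace u old new := by
  rw [replace_eq_repF _ _ _ h, replace_eq_repF _ _ _ h]
  obtain ⟨o, old', rfl⟩ : ∃ o old', old = o :: old' := by
    cases old with | nil => exact absurd rfl h | cons o old' => exact ⟨o, old', rfl⟩
  show repF _ new ((o :: old') ++ u).length ((o :: old') ++ u) = _
  rw [show ((o :: old') ++ u) = o :: (old' ++ u) by simp,
      show (o :: (old' ++ u)).length = (old' ++ u).length + 1 by simp]
  rw [repF, if_pos (by simp [List.isPrefixOf_iff_prefix])]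
  congr 1
  have hd : (o :: (old' ++ u)).drop (o :: old').length = u := by
    simp
  rw [hd]
  exact repF_fuel _ _ h _ _ _ (by simp) le_rfl

theorem prefix_append_cases {k a u : List Char} (h : k <+: a ++ u) : k <+: a ∨ a <+: k := by
  induction k generalizing a with
  | nil => left; exact List.nil_prefix
  | cons c k' ih =>
    cases a with
    | nil => right; exact List.nil_prefix
    | cons b a' =>
      rw [List.cons_append, List.cons_prefix_cons] at h
      obtain ⟨rfl, h'⟩ := h
      rcases ih h' with h2 | h2
      · left; exact List.cons_prefix_cons.mpr ⟨rfl, h2⟩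
      · right; exact List.cons_prefix_cons.mpr ⟨rfl, h2⟩

-- a block inside which no occurrence of `old` can start distributes out of replace
theorem replace_append (old new : List Char) (h : old ≠ []) :
    ∀ (a u : List Char), (∀ s ∈ a.tails, s ≠ [] → ¬ old <+: s ∧ ¬ s <+: old) →
      PySem.Chars.replace (a ++ u) old new = a ++ PySem.Chars.replace u old new := by
  intro a
  induction a with
  | nil => intro u _; simp
  | cons c a' ih =>
    intro u H
    have hnp : ¬ old <+: (c :: a') ++ u := by
      intro hp
      rcases prefix_append_cases hp with h2 | h2
      · exact (H (c :: a') (by simp) (by simp)).1 h2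
      · exact (H (c :: a') (by simp) (by simp)).2 h2
    rw [List.cons_append, replace_cons old new h _ _ (by simpa using hnp)]
    rw [ih u (fun s hs hne => H s ((List.mem_tails _ _).mpr (((List.mem_tails _ _).mp hs).trans (List.tail_suffix (c :: a')))) hne)]
    rfl

-- a replace cannot create a prefix p that was not already there
theorem replace_no_create (old v : List Char) (h : old ≠ []) :
    ∀ (t p : List Char), (∀ s ∈ p.tails, s ≠ [] → ¬ s <+: v ∧ ¬ v <+: s) →
      p <+: PySem.Chars.replace t old v → p <+: t := by
  intro t
  induction t with
  | nil =>
    intro p _ hp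
    rw [replace_nil _ _ h] at hp
    simpa using hp
  | cons c t' ih =>
    intro p H hp
    by_cases hk : old <+: (c :: t')
    · obtain ⟨u, hu⟩ := hk
      rw [← hu, replace_pref _ _ h] at hp
      cases p with
      | nil => exact List.nil_prefix
      | cons d p' =>
        exfalso
        rcases prefix_append_cases hp with h2 | h2
        · exact (H (d :: p') (by simp) (by simp)).1 h2
        · exact (H (d :: p') (by simp) (by simp)).2 h2
    · rw [replace_cons _ _ h _ _ hk] at hp
      cases p with
      | nil => exact List.nil_prefix
      | cons d p' =>
        rw [List.cons_prefix_cons] at hp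
        obtain ⟨rfl, hp'⟩ := hp
        have := ih p' (fun s hs hne => H s ((List.mem_tails _ _).mpr (((List.mem_tails _ _).mp hs).trans (List.tail_suffix (d :: p')))) hne) hp'
        exact List.cons_prefix_cons.mpr ⟨rfl, this⟩

-- "no key match at the head" is preserved by an earlier replace
theorem not_prefix_replace (k old v : List Char) (hk : k ≠ []) (h : old ≠ [])
    (H : ∀ s ∈ k.tail.tails, s ≠ [] → ¬ s <+: v ∧ ¬ v <+: s)
    (c : Char) (t : List Char) (hpre : ¬ k <+: (c :: t)) :
    ¬ k <+: c :: PySem.Chars.replace t old v := by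
  intro hp
  obtain ⟨d, k', rfl⟩ : ∃ d k', k = d :: k' := by
    cases k with | nil => exact absurd rfl hk | cons d k' => exact ⟨d, k', rfl⟩
  rw [List.cons_prefix_cons] at hp
  obtain ⟨rfl, hp'⟩ := hp
  exact hpre (List.cons_prefix_cons.mpr ⟨rfl, replace_no_create old v h t k' (by simpa using H) hp'⟩)

-- the non-overlap conditions a translation table must satisfy (abbrev so `decide` sees through)
abbrev KeyOkay (k b : List Char) : Prop := ∀ s ∈ k.tails, s ≠ [] → ¬ b <+: s ∧ ¬ s <+: b
abbrev ValOkay (v b : List Char) : Prop := ∀ s ∈ v.tails, s ≠ [] → ¬ b <+: s ∧ ¬ s <+: b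
abbrev NCOkay (k v : List Char) : Prop := ∀ s ∈ k.tail.tails, s ≠ [] → ¬ s <+: v ∧ ¬ v <+: s
abbrev GoodTbl (tbl : List (List Char × List Char)) : Prop :=
  (∀ kv ∈ tbl, kv.1 ≠ []) ∧
  (∀ a ∈ tbl, ∀ b ∈ tbl, a ≠ b → KeyOkay a.1 b.1) ∧
  List.Pairwise (fun x y => ValOkay x.2 y.1 ∧ NCOkay y.1 x.2) tbl

-- A's loop, on the character-list side
def chainRep (tbl : List (List Char × List Char)) (l : List Char) : List Char :=
  tbl.foldl (fun s kv => PySem.Chars.replace s kv.1 kv.2) l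

theorem chainRep_nil (tbl : List (List Char × List Char)) (h : ∀ kv ∈ tbl, kv.1 ≠ []) :
    chainRep tbl [] = [] := by
  induction tbl with
  | nil => rfl
  | cons kv rest ih =>
    show chainRep rest (PySem.Chars.replace [] kv.1 kv.2) = []
    rw [replace_nil _ _ (h kv (by simp))]
    exact ih (fun x hx => h x (by simp [hx]))

theorem chainRep_append (tbl : List (List Char × List Char))
    (h1 : ∀ kv ∈ tbl, kv.1 ≠ []) :
    ∀ (a u : List Char), (∀ kv ∈ tbl, ∀ s ∈ a.tails, s ≠ [] → ¬ kv.1 <+: s ∧ ¬ s <+: kv.1) →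
      chainRep tbl (a ++ u) = a ++ chainRep tbl u := by
  induction tbl with
  | nil => intro a u _; rfl
  | cons kv rest ih =>
    intro a u H
    show chainRep rest (PySem.Chars.replace (a ++ u) kv.1 kv.2) = _
    rw [replace_append kv.1 kv.2 (h1 kv (by simp)) a u (H kv (by simp))]
    exact ih (fun x hx => h1 x (by simp [hx])) a _ (fun x hx => H x (by simp [hx]))

theorem chainRep_cons (tbl : List (List Char × List Char)) (c : Char) :
    ∀ (t : List Char),
      (∀ kv ∈ tbl, kv.1 ≠ []) →
      List.Pairwise (fun x y => NCOkay y.1 x.2) tbl →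
      (∀ kv ∈ tbl, ¬ kv.1 <+: (c :: t)) →
      chainRep tbl (c :: t) = c :: chainRep tbl t := by
  induction tbl with
  | nil => intro t _ _ _; rfl
  | cons kv rest ih =>
    intro t h1 h2 H
    show chainRep rest (PySem.Chars.replace (c :: t) kv.1 kv.2) = _
    rw [replace_cons _ _ (h1 kv (by simp)) _ _ (H kv (by simp))]
    rw [ih (PySem.Chars.replace t kv.1 kv.2)
        (fun x hx => h1 x (by simp [hx]))
        (List.Pairwise.sublist (by simp) h2)
        (fun x hx => not_prefix_replace x.1 kv.1 kv.2 (h1 x (by simp [hx])) (h1 kv (by simp))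
          ((List.pairwise_cons.mp h2).1 x hx) c t (H x (by simp [hx])))]
    rfl

-- a nonempty prefix of c :: t starts with c
theorem head_of_prefix {x : List Char} {c : Char} {t : List Char}
    (hne : x ≠ []) (hp : x <+: (c :: t)) : x.head? = some c := by
  cases x with
  | nil => exact absurd rfl hne
  | cons a l =>
    rw [List.cons_prefix_cons] at hp
    rw [hp.1]; rfl

-- the heart of the file: A's chain of replaces equals B's index-driven scan, for any table
-- whose keys are nonempty, pairwise non-overlapping, start with pairwise-distinct letters,
-- and whose index answers exactly the key (if any) starting with the queried letter
theorem chainRep_eq_indexScan (tbl : List (List Char × List Char))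
    (index : PySem.Dict Char (String × String))
    (hG : GoodTbl tbl) (hnd : tbl.Nodup)
    (Hsome : ∀ (c : Char) (hit : String × String), index.get? c = some hit →
        (hit.1.toList, hit.2.toList) ∈ tbl ∧ hit.1.toList.head? = some c)
    (Hnone : ∀ (c : Char), index.get? c = none → ∀ x ∈ tbl, x.1.head? ≠ some c)
    (Hheads : ∀ a ∈ tbl, ∀ b ∈ tbl, a.1.head? = b.1.head? → a = b) :
    ∀ (n : Nat) (l : List Char), l.length ≤ n → chainRep tbl l = pvIndexScan index n l := by
  obtain ⟨h1, h2, h3⟩ := hG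
  intro n
  induction n with
  | zero =>
    intro l hl
    have : l = [] := List.eq_nil_of_length_eq_zero (Nat.le_zero.mp hl)
    subst this
    rw [chainRep_nil tbl h1]; rfl
  | succ n ih =>
    intro l hl
    cases l with
    | nil => rw [chainRep_nil tbl h1]; rfl
    | cons c t =>
      have hnomatch_case : (∀ x ∈ tbl, ¬ x.1 <+: (c :: t)) →
          chainRep tbl (c :: t) = c :: chainRep tbl t := fun hno =>
        chainRep_cons tbl c t h1 (h3.imp (fun h => h.2)) hno
      match hidx : index.get? c with
      | some hit =>
        obtain ⟨hkvmem, hhead⟩ := Hsome c hit hidx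
        by_cases hp : hit.1.toList.isPrefixOf (c :: t)
        · -- the indexed key matches here: emit its translation
          obtain ⟨t', ht'⟩ := List.isPrefixOf_iff_prefix.mp hp
          have hkm : hit.1.toList ≠ [] := h1 _ hkvmem
          obtain ⟨pre, post, htbl⟩ := List.append_of_mem hkvmem
          have hndpre : (hit.1.toList, hit.2.toList) ∉ pre := by
            rw [htbl] at hnd
            have := (List.nodup_append.mp hnd).2.2
            intro hmem
            exact this _ hmem _ List.mem_cons_self rfl
          have hpre' : ∀ x ∈ pre, ¬ x.1 <+: (c :: t) := by
            intro x hx hcon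
            have hxmem : x ∈ tbl := by rw [htbl]; simp; tauto
            have hxh : x.1.head? = some c := head_of_prefix (h1 x hxmem) hcon
            have : x = (hit.1.toList, hit.2.toList) :=
              Hheads x hxmem _ hkvmem (by rw [hxh, hhead])
            exact hndpre (this ▸ hx)
          have hdistr1 : ∀ u, chainRep pre (hit.1.toList ++ u) = hit.1.toList ++ chainRep pre u := by
            intro u
            apply chainRep_append pre (fun x hx => h1 x (by rw [htbl]; simp; tauto))
            intro x hx s hs hsne
            have hxmem : x ∈ tbl := by rw [htbl]; simp; tauto
            have hne : (hit.1.toList, hit.2.toList) ≠ x := by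
              rintro rfl
              exact hpre' _ hx ⟨t', ht'⟩
            exact h2 _ hkvmem x hxmem hne s hs hsne
          have hdistr2 : ∀ u, chainRep post (hit.2.toList ++ u) = hit.2.toList ++ chainRep post u := by
            intro u
            apply chainRep_append post (fun x hx => h1 x (by rw [htbl]; simp; tauto))
            intro x hx s hs hsne
            have hR : ValOkay hit.2.toList x.1 := by
              rw [htbl] at h3
              obtain ⟨-, hcp, -⟩ := List.pairwise_append.mp h3
              exact ((List.pairwise_cons.mp hcp).1 x hx).1
            exact hR s hs hsne
          have hsplit : chainRep tbl = fun l =>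
              chainRep post (PySem.Chars.replace (chainRep pre l) hit.1.toList hit.2.toList) := by
            funext l
            rw [htbl]
            show List.foldl _ l (pre ++ (hit.1.toList, hit.2.toList) :: post) = _
            rw [List.foldl_append]
            rfl
          have hlen : t'.length ≤ n := by
            have := congrArg List.length ht'
            rw [List.length_append, List.length_cons] at this
            have hk1 : 1 ≤ hit.1.toList.length := by
              cases h : hit.1.toList with
              | nil => exact absurd h hkm
              | cons _ _ => simp
            simp only [List.length_cons] at hl
            omega
          calc chainRep tbl (c :: t)
              = chainRep post (PySem.Chars.replace (chainRep pre (c :: t)) hit.1.toList hit.2.toList) := by rw [hsplit]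
            _ = chainRep post (PySem.Chars.replace (hit.1.toList ++ chainRep pre t') hit.1.toList hit.2.toList) := by rw [← ht', hdistr1]
            _ = chainRep post (hit.2.toList ++ PySem.Chars.replace (chainRep pre t') hit.1.toList hit.2.toList) := by rw [replace_pref _ _ hkm]
            _ = hit.2.toList ++ chainRep post (PySem.Chars.replace (chainRep pre t') hit.1.toList hit.2.toList) := hdistr2 _
            _ = hit.2.toList ++ chainRep tbl t' := by rw [hsplit]
            _ = hit.2.toList ++ pvIndexScan index n t' := by rw [ih t' hlen]
            _ = pvIndexScan index (n+1) (c :: t) := by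
                  simp only [pvIndexScan, hidx, hp, if_true]
                  congr 2
                  rw [← ht', List.drop_left]
        · -- indexed key does not match here: no key at all matches, copy the character
          have hno : ∀ x ∈ tbl, ¬ x.1 <+: (c :: t) := by
            intro x hx hcon
            have hxh : x.1.head? = some c := head_of_prefix (h1 x hx) hcon
            have : x = (hit.1.toList, hit.2.toList) :=
              Hheads x hx _ hkvmem (by rw [hxh, hhead])
            subst this
            exact hp (List.isPrefixOf_iff_prefix.mpr hcon)
          simp only [List.length_cons] at hl
          rw [hnomatch_case hno, ih t (by omega)]
          simp only [pvIndexScan, hidx]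
          rw [if_neg hp]
      | none =>
        have hno : ∀ x ∈ tbl, ¬ x.1 <+: (c :: t) := by
          intro x hx hcon
          exact Hnone c hidx x hx (head_of_prefix (h1 x hx) hcon)
        simp only [List.length_cons] at hl
        rw [hnomatch_case hno, ih t (by omega), pvIndexScan, hidx]

-- A's String-level loop computes chainRep of the character lists
theorem foldl_str_toList : ∀ (items : List (String × String)) (s : String),
    (items.foldl (fun r kv => PySem.Str.replace r kv.1 kv.2) s).toList
      = chainRep (items.map (fun kv => (kv.1.toList, kv.2.toList))) s.toList := by
  intro items
  induction items with
  | nil => intro s; rfl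
  | cons kv rest ih =>
    intro s
    show (rest.foldl _ (PySem.Str.replace s kv.1 kv.2)).toList = _
    rw [ih (PySem.Str.replace s kv.1 kv.2)]
    simp [chainRep, PySem.Str.toList_replace]

-- one translated language: A's loop equals B's scan
theorem lang_case (tr : PySem.Dict String String) (index : PySem.Dict Char (String × String)) (s : String)
    (hG : GoodTbl (tr.items.map (fun kv => (kv.1.toList, kv.2.toList))))
    (hnd : (tr.items.map (fun kv => (kv.1.toList, kv.2.toList))).Nodup)
    (Hsome : ∀ (c : Char) (hit : String × String), index.get? c = some hit →
        (hit.1.toList, hit.2.toList) ∈ tr.items.map (fun kv => (kv.1.toList, kv.2.toList)) ∧ hit.1.toList.head? = some c)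
    (Hnone : ∀ (c : Char), index.get? c = none →
        ∀ x ∈ tr.items.map (fun kv => (kv.1.toList, kv.2.toList)), x.1.head? ≠ some c)
    (Hheads : ∀ a ∈ tr.items.map (fun kv => (kv.1.toList, kv.2.toList)),
        ∀ b ∈ tr.items.map (fun kv => (kv.1.toList, kv.2.toList)), a.1.head? = b.1.head? → a = b) :
    tr.items.foldl (fun r kv => PySem.Str.replace r kv.1 kv.2) s
      = String.ofList (pvIndexScan index s.toList.length s.toList) := by
  rw [← String.ofList_toList (s := tr.items.foldl (fun r kv => PySem.Str.replace r kv.1 kv.2) s)]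
  rw [foldl_str_toList,
      chainRep_eq_indexScan _ index hG hnd Hsome Hnone Hheads s.toList.length s.toList le_rfl]

-- ===== VERDICT (by name: the statement is the Claim_ definition above) =====
theorem simple_translate_spec : Claim_equal_simple_translate := by
  unfold Claim_equal_simple_translate Spec_simple_translate
  intro text target_lang _
  by_cases hja : target_lang = "ja"
  · subst hja
    rw [simple_translate, simple_translate_alt,
        show pvMOCK.get? "ja" = some (PySem.Dict.mk
          [("beautiful", "美しい"), ("woman", "女性"), ("fashion", "ファッション"),
           ("portrait", "ポートレート"), ("elegant", "エレガント")]) from by decide,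
        show pvAltIndex.get? "ja" = some (PySem.Dict.mk
          [('b', ("beautiful", "美しい")), ('w', ("woman", "女性")),
           ('f', ("fashion", "ファッション")), ('p', ("portrait", "ポートレート")),
           ('e', ("elegant", "エレガント"))]) from by decide]
    refine lang_case _ _ (PySem.Str.lower text) (by decide) (by decide) ?_ ?_ (by decide)
    · intro c hit h
      simp only [PySem.Dict.get?_mk_cons] at h
      split_ifs at h with h1 h2 h3 h4 h5
      · rw [← (beq_iff_eq).mp h1]; cases h; decide
      · rw [← (beq_iff_eq).mp h2]; cases h; decide
      · rw [← (beq_iff_eq).mp h3]; cases h; decide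
      · rw [← (beq_iff_eq).mp h4]; cases h; decide
      · rw [← (beq_iff_eq).mp h5]; cases h; decide
      · exact absurd h (by simp [PySem.Dict.get?])
    · intro c h x hx
      simp only [PySem.Dict.get?_mk_cons] at h
      split_ifs at h with h1 h2 h3 h4 h5
      simp only [beq_iff_eq] at h1 h2 h3 h4 h5
      fin_cases hx <;> simp <;> intro hc <;> simp_all
  · by_cases hes : target_lang = "es"
    · subst hes
      rw [simple_translate, simple_translate_alt,
          show pvMOCK.get? "es" = some (PySem.Dict.mk
            [("beautiful", "hermosa"), ("woman", "mujer"), ("fashion", "moda"),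
             ("portrait", "retrato"), ("elegant", "elegante")]) from by decide,
          show pvAltIndex.get? "es" = some (PySem.Dict.mk
            [('b', ("beautiful", "hermosa")), ('w', ("woman", "mujer")),
             ('f', ("fashion", "moda")), ('p', ("portrait", "retrato")),
             ('e', ("elegant", "elegante"))]) from by decide]
      refine lang_case _ _ (PySem.Str.lower text) (by decide) (by decide) ?_ ?_ (by decide)
      · intro c hit h
        simp only [PySem.Dict.get?_mk_cons] at h
        split_ifs at h with h1 h2 h3 h4 h5
        · rw [← (beq_iff_eq).mp h1]; cases h; decide
        · rw [← (beq_iff_eq).mp h2]; cases h; decide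
        · rw [← (beq_iff_eq).mp h3]; cases h; decide
        · rw [← (beq_iff_eq).mp h4]; cases h; decide
        · rw [← (beq_iff_eq).mp h5]; cases h; decide
        · exact absurd h (by simp [PySem.Dict.get?])
      · intro c h x hx
        simp only [PySem.Dict.get?_mk_cons] at h
        split_ifs at h with h1 h2 h3 h4 h5
        simp only [beq_iff_eq] at h1 h2 h3 h4 h5
        fin_cases hx <;> simp <;> intro hc <;> simp_all
    · rw [simple_translate, simple_translate_alt,
          show pvMOCK.get? target_lang = none from by
            simp [pvMOCK, Ne.symm hja, Ne.symm hes, PySem.Dict.get?],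
          show pvAltIndex.get? target_lang = none from by
            simp [pvAltIndex, Ne.symm hja, Ne.symm hes, PySem.Dict.get?]]
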